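-- pv_equiv track=rewrite | github.com/Pawnnwap/purple-gold-gourd | purple_gold_gourd/plugins/tts/shared.py | _has_repetition
-- ===== SOURCE A (Python) =====
-- def _has_repetition(text: str) -> bool:
--     run_char = ""
--     run = 0
--     for ch in text:
--         if ch == run_char:
--             run += 1
--             if run >= 5:
--                 return True
--         else:
--             run_char = ch
--             run = 1
--     tokens = [token for token in text.split() if token]
--     for index in range(len(tokens) - 3):
--         if tokens[index] == tokens[index + 1] == tokens[index + 2] == tokens[index + 3]:
--             return True
--     return False
-- ===== SOURCE B (Python) =====
-- def _runs(seq):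
--     """Maximal runs of equal elements as (value, length) pairs, by two-pointer scan."""
--     runs = []
--     i = 0
--     n = len(seq)
--     while i < n:
--         j = i + 1
--         while j < n and seq[j] == seq[i]:
--             j += 1
--         runs.append((seq[i], j - i))
--         i = j
--     return runs
--
--
-- def _has_repetition(text: str) -> bool:
--     return any(n >= 5 for _, n in _runs(text)) or any(
--         n >= 4 for _, n in _runs([token for token in text.split() if token])
--     )
-- ===== Notes on version B (the rewrite author's own statement) =====
-- stated objective: alternative
-- what changed: Replaces A's streaming run counter with early return and the 4-wide sliding-window index comparison over tokens by one shared run-length grouping helper (two-pointer scan into maximal runs) followed by an any() test on run lengths (>=5 for chars, >=4 for tokens).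
import Mathlib
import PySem

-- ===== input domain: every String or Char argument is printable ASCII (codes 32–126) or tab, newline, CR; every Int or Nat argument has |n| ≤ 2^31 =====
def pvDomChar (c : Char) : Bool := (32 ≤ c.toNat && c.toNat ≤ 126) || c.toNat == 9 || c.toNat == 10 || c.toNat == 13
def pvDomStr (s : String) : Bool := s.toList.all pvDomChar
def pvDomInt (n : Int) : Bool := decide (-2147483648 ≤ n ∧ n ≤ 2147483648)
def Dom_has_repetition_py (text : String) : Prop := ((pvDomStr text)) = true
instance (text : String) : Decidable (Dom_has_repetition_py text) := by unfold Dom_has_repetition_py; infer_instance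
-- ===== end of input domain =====

-- B groups both scans into maximal runs of equal elements and tests run lengths; alternative decomposition, same cost.

-- ===== PORT A =====
-- A's character loop; run_char starts as "" (matches no single char), ported as Option Char (none initially).
def aCharLoop : List Char → Option Char → Int → Bool
  | [], _, _ => false
  | ch :: rest, runChar, run =>
    if some ch = runChar then
      if run + 1 ≥ 5 then true else aCharLoop rest runChar (run + 1)
    else aCharLoop rest (some ch) 1

-- A's index loop over range(len(tokens) - 3) with the chained 4-way equality.
def aTokLoop (tokens : List String) : List Int → Bool
  | [] => false
  | i :: is =>
    if PySem.List.pyGet? tokens i = PySem.List.pyGet? tokens (i + 1)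
        ∧ PySem.List.pyGet? tokens (i + 1) = PySem.List.pyGet? tokens (i + 2)
        ∧ PySem.List.pyGet? tokens (i + 2) = PySem.List.pyGet? tokens (i + 3) then true
    else aTokLoop tokens is

def has_repetition_py (text : String) : Bool :=
  if aCharLoop text.toList none 0 then true
  else
    let tokens := (PySem.Str.split₀ text).filter (fun t => t ≠ "")
    aTokLoop tokens (PySem.List.pyRange 0 ((tokens.length : Int) - 3) 1)

-- ===== PORT B =====
-- Source B's inner while: advance j while seq[j] == seq[i] (indices always in range, so getD is exact).
def bInner {α : Type} [DecidableEq α] [Inhabited α] (seq : List α) (n i j : Nat) : Nat :=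
  if j < n ∧ seq.getD j default = seq.getD i default then
    bInner seq n i (j + 1)
  else j
termination_by n - j
decreasing_by omega

theorem bInner_le_start {α : Type} [DecidableEq α] [Inhabited α] (seq : List α) (n i j : Nat) : j ≤ bInner seq n i j := by
  unfold bInner
  split
  · have := bInner_le_start seq n i (j + 1)
    omega
  · exact Nat.le_refl j
termination_by n - j
decreasing_by omega

-- Source B's outer while over run starts.
def bOuter {α : Type} [DecidableEq α] [Inhabited α] (seq : List α) (n i : Nat) : List (α × Nat) :=
  if i < n then
    let j := bInner seq n i (i + 1)
    (seq.getD i default, j - i) :: bOuter seq n j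
  else []
termination_by n - i
decreasing_by
  have : i + 1 ≤ bInner seq n i (i + 1) := bInner_le_start seq n i (i + 1)
  omega

def bRuns {α : Type} [DecidableEq α] [Inhabited α] (seq : List α) : List (α × Nat) :=
  bOuter seq seq.length 0

def has_repetition_py_alt (text : String) : Bool :=
  (bRuns text.toList).any (fun p => decide (5 ≤ p.2)) ||
    (bRuns ((PySem.Str.split₀ text).filter (fun t => t ≠ ""))).any (fun p => decide (4 ≤ p.2))

-- ===== PRECONDITION & SPEC =====
def Spec_has_repetition_py (text : String) (out : Bool) : Prop := out = has_repetition_py_alt text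
instance (text : String) (out : Bool) : Decidable (Spec_has_repetition_py text out) := by unfold Spec_has_repetition_py; infer_instance

-- ===== CLAIM (what is proved, stated in full; the proofs are below) =====
def Claim_equal_has_repetition_py : Prop := ∀ (text : String), Dom_has_repetition_py text → Spec_has_repetition_py text (has_repetition_py text)

-- ===== LEMMAS AND PROOFS =====

-- Run-length decomposition used as the common reference: takeRun x l = (length of leading run of x, rest).
def takeRun {α : Type} [DecidableEq α] (x : α) : List α → Nat × List α
  | [] => (0, [])
  | y :: ys => if y = x then ((takeRun x ys).1 + 1, (takeRun x ys).2) else (0, y :: ys)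

theorem takeRun_fst_le {α : Type} [DecidableEq α] (x : α) (l : List α) : (takeRun x l).1 ≤ l.length := by
  induction l with
  | nil => simp [takeRun]
  | cons y ys ih => simp only [takeRun]; split <;> simp <;> omega

theorem takeRun_snd {α : Type} [DecidableEq α] (x : α) (l : List α) : (takeRun x l).2 = l.drop (takeRun x l).1 := by
  induction l with
  | nil => simp [takeRun]
  | cons y ys ih => simp only [takeRun]; split <;> simp [ih]

theorem takeRun_snd_len {α : Type} [DecidableEq α] (x : α) (l : List α) : (takeRun x l).2.length ≤ l.length := by
  rw [takeRun_snd]; simp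

def runsRec {α : Type} [DecidableEq α] : List α → List (α × Nat)
  | [] => []
  | x :: xs => (x, (takeRun x xs).1 + 1) :: runsRec (takeRun x xs).2
termination_by l => l.length
decreasing_by
  have := takeRun_snd_len x xs
  simp
  omega

-- ---- B side: the two-pointer scan computes runsRec ----

theorem bInner_eq {α : Type} [DecidableEq α] [Inhabited α] (seq : List α) (i j : Nat) (hj : j ≤ seq.length) :
    bInner seq seq.length i j = j + (takeRun (seq.getD i default) (seq.drop j)).1 := by
  unfold bInner
  split
  · rename_i h
    have hjl : j < seq.length := h.1
    have hd : seq.drop j = seq[j] :: seq.drop (j + 1) := List.drop_eq_getElem_cons hjl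
    have hg : seq.getD j default = seq[j] := List.getD_eq_getElem seq default hjl
    rw [bInner_eq seq i (j + 1) (by omega), hd]
    simp only [takeRun, hg ▸ h.2, if_pos]
    omega
  · rename_i h
    rcases Nat.lt_or_ge j seq.length with hlt | hge
    · have hd : seq.drop j = seq[j] :: seq.drop (j + 1) := List.drop_eq_getElem_cons hlt
      have hg : seq.getD j default = seq[j] := List.getD_eq_getElem seq default hlt
      have hne : ¬ (seq[j] = seq.getD i default) := by
        intro he; exact h ⟨hlt, hg ▸ he⟩
      rw [hd]
      simp only [takeRun]
      rw [if_neg hne]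
      simp
    · rw [List.drop_eq_nil_of_le hge]
      simp [takeRun]
termination_by seq.length - j
decreasing_by omega

theorem bOuter_eq {α : Type} [DecidableEq α] [Inhabited α] (seq : List α) (i : Nat) :
    bOuter seq seq.length i = runsRec (seq.drop i) := by
  unfold bOuter
  split
  · rename_i h
    have hd : seq.drop i = seq[i] :: seq.drop (i + 1) := List.drop_eq_getElem_cons h
    have hg : seq.getD i default = seq[i] := List.getD_eq_getElem seq default h
    have hbi : bInner seq seq.length i (i + 1)
        = (i + 1) + (takeRun (seq.getD i default) (seq.drop (i + 1))).1 :=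
      bInner_eq seq i (i + 1) (by omega)
    have hstep : i + 1 ≤ bInner seq seq.length i (i + 1) := bInner_le_start seq seq.length i (i + 1)
    rw [hg] at hbi
    rw [hd]
    simp only [runsRec]
    rw [bOuter_eq seq (bInner seq seq.length i (i + 1)), hg, hbi]
    congr 1
    · congr 1
      omega
    · congr 1
      rw [takeRun_snd, List.drop_drop]
  · rename_i h
    rw [List.drop_eq_nil_of_le (by omega)]
    simp [runsRec]
termination_by seq.length - i
decreasing_by
  have : i + 1 ≤ bInner seq seq.length i (i + 1) := bInner_le_start seq seq.length i (i + 1)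
  omega

theorem bRuns_eq {α : Type} [DecidableEq α] [Inhabited α] (seq : List α) : bRuns seq = runsRec seq := by
  have := bOuter_eq seq 0
  simpa [bRuns] using this

-- ---- A side, characters: the counter loop tests for a run of length ≥ 5 ----

def runsAny {α : Type} [DecidableEq α] (k : Nat) (l : List α) : Bool :=
  (runsRec l).any (fun p => decide (k ≤ p.2))

theorem runsAny_cons {α : Type} [DecidableEq α] (k : Nat) (x : α) (xs : List α) :
    runsAny k (x :: xs) = (decide (k ≤ (takeRun x xs).1 + 1) || runsAny k (takeRun x xs).2) := by
  simp [runsAny, runsRec]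

theorem aCharLoop_run (cs : List Char) (c : Char) (r : Int) (h1 : 1 ≤ r) (h4 : r ≤ 4) :
    aCharLoop cs (some c) r
      = (decide (5 ≤ r + ((takeRun c cs).1 : Int)) || runsAny 5 (takeRun c cs).2) := by
  induction cs generalizing c r with
  | nil =>
    simp [aCharLoop, takeRun, runsAny, runsRec]
    omega
  | cons y ys ih =>
    by_cases hy : y = c
    · subst hy
      rw [show aCharLoop (y :: ys) (some y) r
          = (if r + 1 ≥ 5 then true else aCharLoop ys (some y) (r + 1)) from by simp [aCharLoop]]
      rw [show takeRun y (y :: ys) = ((takeRun y ys).1 + 1, (takeRun y ys).2) from by simp [takeRun]]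
      by_cases h5 : r + 1 ≥ 5
      · rw [if_pos h5]
        have hd : decide ((5:Int) ≤ r + ((takeRun y ys).1 + 1 : Nat)) = true := by
          rw [decide_eq_true_eq]
          push_cast
          omega
        rw [hd, Bool.true_or]
      · rw [if_neg h5]
        rw [ih y (r + 1) (by omega) (by omega)]
        have hd : decide ((5:Int) ≤ r + 1 + ((takeRun y ys).1 : Nat))
            = decide ((5:Int) ≤ r + ((takeRun y ys).1 + 1 : Nat)) := by
          rw [decide_eq_decide]
          push_cast
          omega
        rw [hd]
    · simp only [aCharLoop, Option.some.injEq, if_neg hy]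
      rw [ih y 1 (by omega) (by omega)]
      rw [show takeRun c (y :: ys) = (0, y :: ys) by simp [takeRun, hy]]
      rw [runsAny_cons]
      have hr5 : decide ((5:Int) ≤ r + (((0:Nat)) : Int)) = false := by
        simp
        omega
      rw [hr5, Bool.false_or]
      have hd : decide ((5:Int) ≤ 1 + ((takeRun y ys).1 : Nat))
          = decide ((5:Nat) ≤ (takeRun y ys).1 + 1) := by
        rw [decide_eq_decide]
        push_cast
        omega
      rw [hd]

theorem aCharLoop_eq (cs : List Char) : aCharLoop cs none 0 = runsAny 5 cs := by
  cases cs with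
  | nil => simp [aCharLoop, runsAny, runsRec]
  | cons y ys =>
    rw [show aCharLoop (y :: ys) none 0 = aCharLoop ys (some y) 1 from by simp [aCharLoop]]
    rw [aCharLoop_run ys y 1 (by omega) (by omega), runsAny_cons]
    congr 1
    simp only [decide_eq_decide]
    push_cast
    omega

-- ---- A side, tokens: the 4-window scan tests for a run of length ≥ 4 ----

def win4 : List String → Bool
  | a :: b :: c :: d :: rest => (decide (a = b) && decide (b = c) && decide (c = d)) || win4 (b :: c :: d :: rest)
  | _ => false
termination_by l => l.length

theorem win4_short (l : List String) (h : l.length < 4) : win4 l = false := by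
  match l with
  | [] => simp [win4]
  | [a] => simp [win4]
  | [a, b] => simp [win4]
  | [a, b, c] => simp [win4]
  | a :: b :: c :: d :: r => simp at h; omega

theorem runsRec_mem_le {α : Type} [DecidableEq α] (l : List α) (p : α × Nat) (hp : p ∈ runsRec l) :
    p.2 ≤ l.length := by
  match l with
  | [] => simp [runsRec] at hp
  | x :: xs =>
    rw [runsRec] at hp
    rcases List.mem_cons.mp hp with h | h
    · subst h
      have := takeRun_fst_le x xs
      simp
      omega
    · have h1 := runsRec_mem_le (takeRun x xs).2 p h
      have h2 := takeRun_snd_len x xs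
      simp
      omega
termination_by l.length
decreasing_by
  have := takeRun_snd_len x xs
  simp
  omega

theorem runsAny_short {α : Type} [DecidableEq α] (k : Nat) (l : List α) (h : l.length < k) :
    runsAny k l = false := by
  rw [runsAny, List.any_eq_false]
  intro p hp
  have := runsRec_mem_le l p hp
  simp
  omega

theorem takeRun_pos {α : Type} [DecidableEq α] (x y : α) (l : List α) (h : 1 ≤ (takeRun x (y :: l)).1) :
    y = x ∧ (takeRun x (y :: l)).1 = (takeRun x l).1 + 1 ∧ (takeRun x (y :: l)).2 = (takeRun x l).2 := by
  by_cases hy : y = x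
  · simp [takeRun, hy]
  · simp [takeRun, hy] at h

theorem aTokLoop_eq (toks : List String) (i : Nat) :
    aTokLoop toks (PySem.List.pyRange i ((toks.length : Int) - 3) 1) = win4 (toks.drop i) := by
  by_cases hi : (i : Int) < (toks.length : Int) - 3
  · have h0 : i + 3 < toks.length := by omega
    have e0 : i < toks.length := by omega
    have e1 : i + 1 < toks.length := by omega
    have e2 : i + 2 < toks.length := by omega
    rw [PySem.List.pyRange_one_cons hi]
    rw [show aTokLoop toks ((i : Int) :: PySem.List.pyRange ((i : Int) + 1) ((toks.length : Int) - 3) 1)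
        = (if PySem.List.pyGet? toks (i : Int) = PySem.List.pyGet? toks ((i : Int) + 1)
              ∧ PySem.List.pyGet? toks ((i : Int) + 1) = PySem.List.pyGet? toks ((i : Int) + 2)
              ∧ PySem.List.pyGet? toks ((i : Int) + 2) = PySem.List.pyGet? toks ((i : Int) + 3) then true
           else aTokLoop toks (PySem.List.pyRange ((i : Int) + 1) ((toks.length : Int) - 3) 1)) from rfl]
    have g0 : PySem.List.pyGet? toks (i : Int) = some toks[i] := by
      rw [PySem.List.pyGet?_natCast, List.getElem?_eq_getElem e0]
    have g1 : PySem.List.pyGet? toks ((i : Int) + 1) = some toks[i + 1] := by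
      rw [show ((i : Int) + 1) = ((i + 1 : Nat) : Int) from by push_cast; ring]
      rw [PySem.List.pyGet?_natCast, List.getElem?_eq_getElem e1]
    have g2 : PySem.List.pyGet? toks ((i : Int) + 2) = some toks[i + 2] := by
      rw [show ((i : Int) + 2) = ((i + 2 : Nat) : Int) from by push_cast; ring]
      rw [PySem.List.pyGet?_natCast, List.getElem?_eq_getElem e2]
    have g3 : PySem.List.pyGet? toks ((i : Int) + 3) = some toks[i + 3] := by
      rw [show ((i : Int) + 3) = ((i + 3 : Nat) : Int) from by push_cast; ring]
      rw [PySem.List.pyGet?_natCast, List.getElem?_eq_getElem h0]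
    rw [g0, g1, g2, g3]
    have hrec : aTokLoop toks (PySem.List.pyRange ((i : Int) + 1) ((toks.length : Int) - 3) 1)
        = win4 (toks.drop (i + 1)) := by
      rw [show ((i : Int) + 1) = ((i + 1 : Nat) : Int) from by push_cast; ring]
      exact aTokLoop_eq toks (i + 1)
    have hd0 : toks.drop i = toks[i] :: toks.drop (i + 1) := List.drop_eq_getElem_cons e0
    have hd1 : toks.drop (i + 1) = toks[i + 1] :: toks.drop (i + 2) := List.drop_eq_getElem_cons e1
    have hd2 : toks.drop (i + 2) = toks[i + 2] :: toks.drop (i + 3) := List.drop_eq_getElem_cons e2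
    have hd3 : toks.drop (i + 3) = toks[i + 3] :: toks.drop (i + 4) := List.drop_eq_getElem_cons h0
    rw [hrec, hd0, hd1, hd2, hd3]
    rw [show win4 (toks[i] :: toks[i + 1] :: toks[i + 2] :: toks[i + 3] :: toks.drop (i + 4))
        = ((decide (toks[i] = toks[i + 1]) && decide (toks[i + 1] = toks[i + 2]) && decide (toks[i + 2] = toks[i + 3]))
           || win4 (toks[i + 1] :: toks[i + 2] :: toks[i + 3] :: toks.drop (i + 4))) from by rw [win4]]
    by_cases hc : toks[i] = toks[i + 1] ∧ toks[i + 1] = toks[i + 2] ∧ toks[i + 2] = toks[i + 3]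
    · rw [if_pos (by simp [hc.1, hc.2.1, hc.2.2])]
      simp [hc.1, hc.2.1, hc.2.2]
    · rw [if_neg (by simpa using hc)]
      have : (decide (toks[i] = toks[i + 1]) && decide (toks[i + 1] = toks[i + 2]) && decide (toks[i + 2] = toks[i + 3])) = false := by
        simp only [Bool.and_eq_false_iff, decide_eq_false_iff_not]
        tauto
      rw [this, Bool.false_or]
  · rw [PySem.List.pyRange_one_eq_nil (by omega)]
    rw [show aTokLoop toks [] = false from rfl]
    rw [win4_short _ (by simp; omega)]
termination_by toks.length - i
decreasing_by omega

theorem runsAny4_cons (x : String) (l : List String) (h : (takeRun x l).1 ≤ 2) :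
    runsAny 4 (x :: l) = runsAny 4 l := by
  rw [runsAny_cons]
  have hd : decide (4 ≤ (takeRun x l).1 + 1) = false := by simp; omega
  rw [hd, Bool.false_or]
  match l with
  | [] => simp [takeRun]
  | y :: ys =>
    by_cases hy : y = x
    · subst hy
      have h1 : 1 ≤ (takeRun y (y :: ys)).1 := by simp [takeRun]
      obtain ⟨-, hfst, hsnd⟩ := takeRun_pos y y ys h1
      rw [hsnd]
      rw [runsAny_cons]
      have hd2 : decide (4 ≤ (takeRun y ys).1 + 1) = false := by
        simp
        omega
      rw [hd2, Bool.false_or]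
    · rw [show takeRun x (y :: ys) = (0, y :: ys) from by simp [takeRun, hy]]

theorem win4_eq_runsAny (l : List String) : win4 l = runsAny 4 l := by
  match l with
  | [] => rw [win4_short _ (by simp), runsAny_short 4 _ (by simp)]
  | [a] => rw [win4_short _ (by simp), runsAny_short 4 _ (by simp)]
  | [a, b] => rw [win4_short _ (by simp), runsAny_short 4 _ (by simp)]
  | [a, b, c] => rw [win4_short _ (by simp), runsAny_short 4 _ (by simp)]
  | a :: b :: c :: d :: r =>
    rw [show win4 (a :: b :: c :: d :: r)
        = ((decide (a = b) && decide (b = c) && decide (c = d)) || win4 (b :: c :: d :: r)) from by rw [win4]]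
    by_cases hall : a = b ∧ b = c ∧ c = d
    · obtain ⟨h1, h2, h3⟩ := hall
      subst h1; subst h2; subst h3
      have : 3 ≤ (takeRun a (a :: a :: a :: r)).1 := by simp [takeRun]
      rw [runsAny_cons]
      simp only [decide_eq_true_eq, Bool.true_and, Bool.and_self]
      have hd : decide (4 ≤ (takeRun a (a :: a :: a :: r)).1 + 1) = true := by
        simp
        omega
      rw [hd]
      simp
    · have hzero : (decide (a = b) && decide (b = c) && decide (c = d)) = false := by
        simp only [Bool.and_eq_false_iff, decide_eq_false_iff_not]
        tauto
      rw [hzero, Bool.false_or]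
      have hm : (takeRun a (b :: c :: d :: r)).1 ≤ 2 := by
        by_contra hgt
        have h1 : 1 ≤ (takeRun a (b :: c :: d :: r)).1 := by omega
        obtain ⟨hb, hf1, -⟩ := takeRun_pos a b (c :: d :: r) h1
        have h2 : 1 ≤ (takeRun a (c :: d :: r)).1 := by omega
        obtain ⟨hcx, hf2, -⟩ := takeRun_pos a c (d :: r) h2
        have h3 : 1 ≤ (takeRun a (d :: r)).1 := by omega
        obtain ⟨hdx, -, -⟩ := takeRun_pos a d r h3
        exact hall ⟨hb.symm, hb ▸ hcx.symm, hcx ▸ hdx.symm⟩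
      rw [runsAny4_cons a _ hm]
      exact win4_eq_runsAny (b :: c :: d :: r)
termination_by l.length

-- ===== VERDICT (by name: the statement is the Claim_ definition above) =====
theorem has_repetition_py_spec : Claim_equal_has_repetition_py := by
  intro text _
  unfold Spec_has_repetition_py has_repetition_py has_repetition_py_alt
  have hA : (bRuns text.toList).any (fun p => decide (5 ≤ p.2)) = aCharLoop text.toList none 0 := by
    rw [bRuns_eq, aCharLoop_eq, runsAny]
  have hB : (bRuns ((PySem.Str.split₀ text).filter (fun t => t ≠ ""))).any (fun p => decide (4 ≤ p.2))
      = aTokLoop ((PySem.Str.split₀ text).filter (fun t => t ≠ ""))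
          (PySem.List.pyRange 0 ((((PySem.Str.split₀ text).filter (fun t => t ≠ "")).length : Int) - 3) 1) := by
    rw [bRuns_eq]
    rw [show (0 : Int) = ((0 : Nat) : Int) from rfl]
    rw [aTokLoop_eq ((PySem.Str.split₀ text).filter (fun t => t ≠ "")) 0]
    rw [List.drop_zero, win4_eq_runsAny, runsAny]
  rw [hA, hB]
  cases h : aCharLoop text.toList none 0 <;> simp
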